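-- pv_equiv track=rewrite | github.com/TakaIshikawa/blueprint | src/blueprint/source_payment_method_update_requirements.py | _best_trigger
-- ===== SOURCE A (Python) =====
-- from typing import Any, Iterable, Literal, Mapping, TypeVar
--
-- _T = TypeVar("_T")
--
-- def _best_trigger(values: Iterable[str | None]) -> str | None:
--     triggers = _dedupe(value for value in values if value)
--     if not triggers:
--         return None
--     for trigger in ("expired_or_expiring", "failed_payment", "customer_requested", "checkout_or_invoice"):
--         if trigger in triggers:
--             return trigger
--     return triggers[0]
--
-- def _dedupe(values: Iterable[_T]) -> list[_T]:
--     deduped: list[_T] = []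
--     seen: set[str] = set()
--     for value in values:
--         if not value:
--             continue
--         key = str(value).casefold()
--         if key in seen:
--             continue
--         deduped.append(value)
--         seen.add(key)
--     return deduped
-- ===== SOURCE B (Python) =====
-- _PRIORITY = {"expired_or_expiring": 0, "failed_payment": 1, "customer_requested": 2, "checkout_or_invoice": 3}
--
--
-- def _best_trigger(values):
--     seen = set()
--     fallback = None
--     best = None  # (rank, value) with the smallest rank seen so far
--     for value in values:
--         if not value:
--             continue
--         key = value.casefold()
--         if key in seen:
--             continue
--         seen.add(key)
--         if fallback is None:
--             fallback = value
--         rank = _PRIORITY.get(value)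
--         if rank is not None and (best is None or rank < best[0]):
--             best = (rank, value)
--     return best[1] if best is not None else fallback
-- ===== Notes on version B (the rewrite author's own statement) =====
-- stated objective: alternative
-- what changed: Replaces the build-a-deduped-list-then-scan-the-priority-tuple structure by a single fold over the input that tracks a seen set, the first surviving value as fallback, and the best (lowest-rank) trigger via a priority-index dict.
import Mathlib
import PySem

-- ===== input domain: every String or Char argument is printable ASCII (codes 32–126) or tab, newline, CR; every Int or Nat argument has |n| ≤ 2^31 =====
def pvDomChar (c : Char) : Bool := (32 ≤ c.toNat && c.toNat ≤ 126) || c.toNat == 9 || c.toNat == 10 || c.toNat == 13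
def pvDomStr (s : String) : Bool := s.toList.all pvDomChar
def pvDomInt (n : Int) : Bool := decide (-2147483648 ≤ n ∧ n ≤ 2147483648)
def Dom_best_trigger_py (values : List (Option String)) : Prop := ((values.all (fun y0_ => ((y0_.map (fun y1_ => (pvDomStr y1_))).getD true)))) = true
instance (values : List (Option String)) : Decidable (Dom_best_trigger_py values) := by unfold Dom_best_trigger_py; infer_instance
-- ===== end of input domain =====

-- B replaces A's dedupe-list-then-scan-priority-tuple with one fold keeping (seen set, fallback, best rank); same results, alternative structure.

-- ===== PORT A =====
-- str.casefold is ported as PySem.Str.lower: exact on the ASCII domain.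
-- the dedupe loop of _dedupe, state (deduped, seen)
def pvStepA (st : List String × PySem.Set String) (value : String) :
    List String × PySem.Set String :=
  if value = "" then st
  else
    let key := PySem.Str.lower value
    if PySem.Set.contains st.2 key then st
    else (st.1 ++ [value], PySem.Set.add st.2 key)

def best_trigger_py (values : List (Option String)) : Option String :=
  -- generator: (value for value in values if value); None and "" are falsy
  let gen : List String := values.filterMap (fun v =>
    match v with
    | none => none
    | some s => if s = "" then none else some s)
  let triggers := (gen.foldl pvStepA ([], PySem.Set.empty)).1
  if triggers = [] then none
  else
    match (["expired_or_expiring", "failed_payment", "customer_requested",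
            "checkout_or_invoice"]).find? (fun t => triggers.contains t) with
    | some t => some t
    | none => PySem.List.pyGet? triggers 0

-- ===== PORT B =====
def pvPriority : PySem.Dict String Int :=
  PySem.Dict.ofList [("expired_or_expiring", 0), ("failed_payment", 1),
                     ("customer_requested", 2), ("checkout_or_invoice", 3)]

-- one loop iteration of B, state (seen, fallback, best)
def pvStepB (st : PySem.Set String × Option String × Option (Int × String))
    (v : Option String) : PySem.Set String × Option String × Option (Int × String) :=
  match v with
  | none => st
  | some s =>
    if s = "" then st
    else
      let key := PySem.Str.lower s
      if PySem.Set.contains st.1 key then st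
      else
        let seen := PySem.Set.add st.1 key
        let fallback := match st.2.1 with | none => some s | some f => some f
        let best :=
          match PySem.Dict.get? pvPriority s, st.2.2 with
          | some r, none => some (r, s)
          | some r, some (br, bs) => if r < br then (r, s) else (br, bs)
          | none, b => b
        (seen, fallback, best)

def best_trigger_py_alt (values : List (Option String)) : Option String :=
  let st := values.foldl pvStepB (PySem.Set.empty, none, none)
  match st.2.2 with
  | some (_, s) => some s
  | none => st.2.1

-- ===== PRECONDITION & SPEC =====
def Spec_best_trigger_py (values : List (Option String)) (out : Option String) : Prop := out = best_trigger_py_alt values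
instance (values : List (Option String)) (out : Option String) : Decidable (Spec_best_trigger_py values out) := by unfold Spec_best_trigger_py; infer_instance

-- ===== CLAIM (what is proved, stated in full; the proofs are below) =====
def Claim_equal_best_trigger_py : Prop := ∀ (values : List (Option String)), Dom_best_trigger_py values → Spec_best_trigger_py values (best_trigger_py values)

-- ===== LEMMAS AND PROOFS =====

-- B's best accumulator, expressed as a fold over the deduped list
def pvBestAux (d : List String) : Option (Int × String) :=
  d.foldl (fun b s =>
    match PySem.Dict.get? pvPriority s, b with
    | some r, none => some (r, s)
    | some r, some (br, bs) => if r < br then (r, s) else (br, bs)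
    | none, b => b) none

lemma pvBestAux_nil : pvBestAux [] = none := rfl

lemma pvBestAux_append (d : List String) (s : String) :
    pvBestAux (d ++ [s]) =
      match PySem.Dict.get? pvPriority s, pvBestAux d with
      | some r, none => some (r, s)
      | some r, some (br, bs) => if r < br then (r, s) else (br, bs)
      | none, b => b := by
  simp [pvBestAux, List.foldl_append]

-- joint loop invariant: B's state mirrors A's (deduped, seen)
lemma pvLoop_inv (gen : List (Option String)) (d : List String) (seen : PySem.Set String) :
    gen.foldl pvStepB (seen, d.head?, pvBestAux d) =
      (((gen.filterMap (fun v => match v with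
          | none => none
          | some s => if s = "" then none else some s)).foldl pvStepA (d, seen)).2,
       ((gen.filterMap (fun v => match v with
          | none => none
          | some s => if s = "" then none else some s)).foldl pvStepA (d, seen)).1.head?,
       pvBestAux ((gen.filterMap (fun v => match v with
          | none => none
          | some s => if s = "" then none else some s)).foldl pvStepA (d, seen)).1) := by
  induction gen generalizing d seen with
  | nil => simp
  | cons v gen ih =>
    cases v with
    | none => simpa [pvStepB] using ih d seen
    | some s =>
      by_cases hs : s = ""
      · simpa [pvStepB, hs] using ih d seen
      · cases hc : PySem.Set.contains seen (PySem.Str.lower s) with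
        | true =>
          have eB : pvStepB (seen, d.head?, pvBestAux d) (some s) = (seen, d.head?, pvBestAux d) := by
            simp only [pvStepB, if_neg hs, hc, if_true]
          have eA : pvStepA (d, seen) s = (d, seen) := by
            simp only [pvStepA, if_neg hs, hc, if_true]
          simp only [List.filterMap_cons, if_neg hs, List.foldl_cons, eB, eA]
          exact ih d seen
        | false =>
          have hc' : PySem.Str.lower s ∉ seen := by
            simpa using hc
          have eB : pvStepB (seen, d.head?, pvBestAux d) (some s)
              = (PySem.Set.add seen (PySem.Str.lower s), (d ++ [s]).head?, pvBestAux (d ++ [s])) := by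
            rw [pvBestAux_append]
            cases d <;> simp [pvStepB, hs, hc']
          have eA : pvStepA (d, seen) s = (d ++ [s], PySem.Set.add seen (PySem.Str.lower s)) := by
            simp [pvStepA, hs, hc']
          simp only [List.filterMap_cons, if_neg hs, List.foldl_cons, eB, eA]
          exact ih (d ++ [s]) (PySem.Set.add seen (PySem.Str.lower s))

lemma pvGet0 : PySem.Dict.get? pvPriority "expired_or_expiring" = some 0 := by rfl
lemma pvGet1 : PySem.Dict.get? pvPriority "failed_payment" = some 1 := by rfl
lemma pvGet2 : PySem.Dict.get? pvPriority "customer_requested" = some 2 := by rfl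
lemma pvGet3 : PySem.Dict.get? pvPriority "checkout_or_invoice" = some 3 := by rfl

lemma pvGetNone (s : String) (h0 : s ≠ "expired_or_expiring") (h1 : s ≠ "failed_payment")
    (h2 : s ≠ "customer_requested") (h3 : s ≠ "checkout_or_invoice") :
    PySem.Dict.get? pvPriority s = none := by
  have e : pvPriority = PySem.Dict.mk [("expired_or_expiring", 0), ("failed_payment", 1),
      ("customer_requested", 2), ("checkout_or_invoice", 3)] := by rfl
  rw [e]
  simp [PySem.Dict.get?, Ne.symm h0, Ne.symm h1, Ne.symm h2, Ne.symm h3]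

-- pvBestAux picks exactly the trigger A's priority scan finds
lemma pvBestAux_char (d : List String) :
    pvBestAux d =
      if d.contains "expired_or_expiring" then some (0, "expired_or_expiring")
      else if d.contains "failed_payment" then some (1, "failed_payment")
      else if d.contains "customer_requested" then some (2, "customer_requested")
      else if d.contains "checkout_or_invoice" then some (3, "checkout_or_invoice")
      else none := by
  induction d using List.reverseRecOn with
  | nil => simp [pvBestAux]
  | append_singleton d s ih =>
    rw [pvBestAux_append, ih]
    by_cases h0 : s = "expired_or_expiring"
    · subst h0; rw [pvGet0]; simp; split_ifs <;> simp_all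
    · by_cases h1 : s = "failed_payment"
      · subst h1; rw [pvGet1]; simp; split_ifs <;> simp_all
      · by_cases h2 : s = "customer_requested"
        · subst h2; rw [pvGet2]; simp; split_ifs <;> simp_all
        · by_cases h3 : s = "checkout_or_invoice"
          · subst h3; rw [pvGet3]; simp; split_ifs <;> simp_all
          · rw [pvGetNone s h0 h1 h2 h3]
            simp [eq_comm, h0, h1, h2, h3]

lemma pvPyGet_zero (d : List String) (h : d ≠ []) :
    PySem.List.pyGet? d 0 = d.head? := by
  cases d with
  | nil => simp at h
  | cons a l => simp [PySem.List.pyGet?, PySem.List.pyIdx?]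

-- ===== VERDICT (by name: the statement is the Claim_ definition above) =====
theorem best_trigger_py_spec : Claim_equal_best_trigger_py := by
  intro values _
  unfold Spec_best_trigger_py best_trigger_py best_trigger_py_alt
  have h := pvLoop_inv values [] PySem.Set.empty
  rw [pvBestAux_nil, List.head?_nil] at h
  rw [h]
  dsimp only
  rw [pvBestAux_char]
  set d := ((values.filterMap (fun v => match v with
      | none => none
      | some s => if s = "" then none else some s)).foldl pvStepA ([], PySem.Set.empty)).1 with hd
  by_cases hnil : d = []
  · simp [hnil]
  · rw [pvPyGet_zero d hnil]
    simp only [if_neg hnil, List.find?_cons, List.find?_nil]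
    split_ifs <;> simp_all
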